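-- pv_equiv track=rewrite | github.com/demeet2k/athena-mcp-server | Voynich/FULL_TRANSLATION/framework/scripts/render_book2_section_parallel.py | astro_counts
-- ===== SOURCE A (Python) =====
-- def astro_counts(lines: list[tuple[str, str]]) -> dict[str, int]:
--     out = {"units": 0, "temporal": 0, "phase": 0, "completion": 0, "saturn": 0, "valve": 0}
--     for _lid, eva in lines:
--         e = eva.lower()
--         out["units"] += 1
--         out["temporal"] += e.count("ot")
--         out["phase"] += e.count("ok")
--         out["completion"] += e.count("aiin") + e.count("aiir") + e.count("daii")
--         out["saturn"] += e.count("qokal")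
--         out["valve"] += e.count("ckh") + e.count("kch")
--     return out
-- ===== SOURCE B (Python) =====
-- def astro_counts(lines: list[tuple[str, str]]) -> dict[str, int]:
--     # Join all lowercased EVA strings with '\n' (non-letter, so no match can
--     # cross a line boundary) and take one str.count per pattern over the big string.
--     big = "\n".join(eva.lower() for _lid, eva in lines)
--     return {
--         "units": len(lines),
--         "temporal": big.count("ot"),
--         "phase": big.count("ok"),
--         "completion": big.count("aiin") + big.count("aiir") + big.count("daii"),
--         "saturn": big.count("qokal"),
--         "valve": big.count("ckh") + big.count("kch"),
--     }
-- ===== Notes on version B (the rewrite author's own statement) =====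
-- stated objective: simpler
-- what changed: Instead of a per-line loop mutating a six-key dict, B joins all lowercased EVA strings with a '\n' separator (non-letter, so no pattern can match across a boundary) and derives each category from a single str.count over the joined string; units is just len(lines).
import Mathlib
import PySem

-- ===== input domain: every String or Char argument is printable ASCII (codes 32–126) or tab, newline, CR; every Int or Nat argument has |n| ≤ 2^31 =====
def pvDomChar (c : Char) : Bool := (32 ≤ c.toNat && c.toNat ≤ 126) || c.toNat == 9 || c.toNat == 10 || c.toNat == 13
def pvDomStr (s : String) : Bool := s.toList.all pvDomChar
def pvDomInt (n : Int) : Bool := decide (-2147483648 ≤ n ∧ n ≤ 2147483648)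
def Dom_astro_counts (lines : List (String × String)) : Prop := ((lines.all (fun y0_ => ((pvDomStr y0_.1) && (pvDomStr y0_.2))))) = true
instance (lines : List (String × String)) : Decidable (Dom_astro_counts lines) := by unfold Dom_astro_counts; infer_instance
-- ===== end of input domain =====

-- B replaces A's per-line loop over a mutable six-key dict by one '\n'-join of the
-- lowercased EVA strings plus a single substring count per pattern (objective: simpler).


-- ===== PORT A =====
def astroStep (out : PySem.Dict String Int) (line : String × String) : PySem.Dict String Int :=
  let e := PySem.Str.lower line.2
  let out := out.insert "units" (out.getD "units" 0 + 1)
  let out := out.insert "temporal" (out.getD "temporal" 0 + (PySem.Str.count e "ot" : Int))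
  let out := out.insert "phase" (out.getD "phase" 0 + (PySem.Str.count e "ok" : Int))
  let out := out.insert "completion" (out.getD "completion" 0 +
      ((PySem.Str.count e "aiin" : Int) + (PySem.Str.count e "aiir" : Int) + (PySem.Str.count e "daii" : Int)))
  let out := out.insert "saturn" (out.getD "saturn" 0 + (PySem.Str.count e "qokal" : Int))
  let out := out.insert "valve" (out.getD "valve" 0 +
      ((PySem.Str.count e "ckh" : Int) + (PySem.Str.count e "kch" : Int)))
  out

def astroInit : PySem.Dict String Int :=
  (((((PySem.Dict.empty.insert "units" 0).insert "temporal" 0).insert "phase" 0).insert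
      "completion" 0).insert "saturn" 0).insert "valve" 0

def astro_counts (lines : List (String × String)) : List (String × Int) :=
  (lines.foldl astroStep astroInit).items

-- ===== PORT B =====
def astro_counts_alt (lines : List (String × String)) : List (String × Int) :=
  let big := PySem.Str.join "\n" (lines.map (fun p => PySem.Str.lower p.2))
  [("units", (lines.length : Int)),
   ("temporal", (PySem.Str.count big "ot" : Int)),
   ("phase", (PySem.Str.count big "ok" : Int)),
   ("completion", (PySem.Str.count big "aiin" : Int) + (PySem.Str.count big "aiir" : Int)
      + (PySem.Str.count big "daii" : Int)),
   ("saturn", (PySem.Str.count big "qokal" : Int)),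
   ("valve", (PySem.Str.count big "ckh" : Int) + (PySem.Str.count big "kch" : Int))]

-- ===== PRECONDITION & SPEC =====
def Spec_astro_counts (lines : List (String × String)) (out : List (String × Int)) : Prop := out = astro_counts_alt lines
instance (lines : List (String × String)) (out : List (String × Int)) : Decidable (Spec_astro_counts lines out) := by unfold Spec_astro_counts; infer_instance

-- ===== CLAIM (what is proved, stated in full; the proofs are below) =====
def Claim_equal_astro_counts : Prop := ∀ (lines : List (String × String)), Dom_astro_counts lines → Spec_astro_counts lines (astro_counts lines)

-- ===== LEMMAS AND PROOFS =====

-- Greedy non-overlapping count, recursion on the scanned list (fuel-free spec of PySem.Chars.count.go).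
def cntSpec (sub : List Char) : List Char → Nat
  | [] => 0
  | h :: t =>
    if !sub.isEmpty && sub.isPrefixOf (h :: t) then
      cntSpec sub ((h :: t).drop sub.length) + 1
    else
      cntSpec sub t
termination_by l => l.length
decreasing_by
  · rename_i hc
    simp only [Bool.and_eq_true, Bool.not_eq_true', List.isEmpty_eq_false_iff] at hc
    have : 1 ≤ sub.length := by
      cases sub with
      | nil => simp at hc
      | cons a b => simp
    simp [List.length_drop]
    omega
  · simp

theorem go_eq_cntSpec (sub : List Char) (hsub : sub ≠ []) :
    ∀ (fuel : Nat) (l : List Char) (acc : Nat), l.length ≤ fuel →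
      PySem.Chars.count.go sub fuel l acc = acc + cntSpec sub l := by
  intro fuel
  induction fuel with
  | zero =>
    intro l acc h
    have hl : l = [] := List.eq_nil_of_length_eq_zero (by omega)
    subst hl
    simp [PySem.Chars.count.go, cntSpec]
  | succ f ih =>
    intro l acc h
    cases l with
    | nil => simp [PySem.Chars.count.go, cntSpec]
    | cons x t =>
      rw [PySem.Chars.count.go]
      have hlen : 1 ≤ sub.length := by
        cases sub with
        | nil => exact absurd rfl hsub
        | cons a b => simp
      simp only [List.length_cons] at h
      by_cases hp : sub.isPrefixOf (x :: t) = true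
      · rw [if_pos hp, ih _ _ (by simp [List.length_drop]; omega)]
        rw [cntSpec]
        simp [List.isEmpty_eq_false_iff.mpr hsub, hp]
        omega
      · rw [if_neg hp, ih _ _ (by omega)]
        rw [cntSpec]
        simp [hp]

theorem count_eq_cntSpec (l sub : List Char) (hsub : sub ≠ []) :
    PySem.Chars.count l sub = cntSpec sub l := by
  unfold PySem.Chars.count
  rw [if_neg (by simp [List.isEmpty_eq_false_iff.mpr hsub]),
    go_eq_cntSpec sub hsub l.length l 0 (le_refl _)]
  omega

theorem isPrefixOf_append_sep (sub a b : List Char) (sep : Char) (hsep : sep ∉ sub) :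
    sub.isPrefixOf (a ++ sep :: b) = sub.isPrefixOf a := by
  by_cases h : sub <+: a
  · rw [List.isPrefixOf_iff_prefix.mpr h,
      List.isPrefixOf_iff_prefix.mpr (h.trans (List.prefix_append a (sep :: b)))]
  · have h2 : ¬ sub <+: (a ++ sep :: b) := by
      intro hpre
      rcases Nat.lt_or_ge a.length sub.length with hlt | hge
      · apply hsep
        have heq : sub = (a ++ sep :: b).take sub.length := List.prefix_iff_eq_take.mp hpre
        rw [heq, List.take_append]
        refine List.mem_append.mpr (Or.inr ?_)
        cases hj : sub.length - a.length with
        | zero => omega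
        | succ j => simp [List.take_succ_cons]
      · exact h (List.prefix_of_prefix_length_le hpre (List.prefix_append a (sep :: b)) hge)
    have ha : sub.isPrefixOf a = false := by
      rw [← Bool.not_eq_true, List.isPrefixOf_iff_prefix]; exact h
    have hab : sub.isPrefixOf (a ++ sep :: b) = false := by
      rw [← Bool.not_eq_true, List.isPrefixOf_iff_prefix]; exact h2
    rw [ha, hab]

theorem cntSpec_append_sep (sub : List Char) (hsub : sub ≠ []) (sep : Char) (hsep : sep ∉ sub) :
    ∀ (a b : List Char), cntSpec sub (a ++ sep :: b) = cntSpec sub a + cntSpec sub b := by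
  have hlen : 1 ≤ sub.length := by
    cases sub with
    | nil => exact absurd rfl hsub
    | cons c cs => simp
  have key : ∀ (n : Nat) (a : List Char), a.length ≤ n → ∀ b,
      cntSpec sub (a ++ sep :: b) = cntSpec sub a + cntSpec sub b := by
    intro n
    induction n with
    | zero =>
      intro a ha b
      have : a = [] := List.eq_nil_of_length_eq_zero (by omega)
      subst this
      rw [List.nil_append, cntSpec]
      have hnp : sub.isPrefixOf (sep :: b) = false := by
        rw [← Bool.not_eq_true, List.isPrefixOf_iff_prefix]
        intro hpre
        cases sub with
        | nil => exact hsub rfl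
        | cons c cs =>
          have := (List.cons_prefix_cons.mp hpre).1
          exact hsep (by simp [this])
      simp [hnp, cntSpec]
    | succ n ih =>
      intro a ha b
      cases a with
      | nil => exact ih [] (by simp) b
      | cons x t =>
        have hcons : (x :: t) ++ sep :: b = x :: (t ++ sep :: b) := rfl
        rw [hcons, cntSpec]
        have hpre : sub.isPrefixOf (x :: (t ++ sep :: b)) = sub.isPrefixOf (x :: t) := by
          rw [← hcons]; exact isPrefixOf_append_sep sub (x :: t) b sep hsep
        by_cases hp : sub.isPrefixOf (x :: t) = true
        · have hle : sub.length ≤ (x :: t).length := (List.isPrefixOf_iff_prefix.mp hp).length_le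
          rw [cntSpec]
          simp only [hpre, hp, List.isEmpty_eq_false_iff.mpr hsub, Bool.not_false, Bool.true_and,
            if_true]
          have hdrop : (x :: (t ++ sep :: b)).drop sub.length
              = ((x :: t).drop sub.length) ++ sep :: b := by
            rw [← hcons, List.drop_append]
            have : sub.length - (x :: t).length = 0 := by omega
            rw [this, List.drop_zero]
          rw [hdrop, ih _ (by simp [List.length_drop]; simp at ha; omega) b]
          omega
        · rw [cntSpec]
          simp only [hpre, hp, List.isEmpty_eq_false_iff.mpr hsub, Bool.not_false, Bool.and_false]
          exact ih t (by simp at ha; omega) b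
  intro a b
  exact key a.length a (le_refl _) b

theorem cntSpec_join (sub : List Char) (hsub : sub ≠ []) (hsep : '\n' ∉ sub) :
    ∀ (evas : List (List Char)),
      cntSpec sub (PySem.Chars.join ['\n'] evas) = (evas.map (cntSpec sub)).sum := by
  intro evas
  induction evas with
  | nil => simp [PySem.Chars.join_nil, cntSpec]
  | cons e rest ih =>
    cases rest with
    | nil => simp [PySem.Chars.join_singleton]
    | cons e2 r =>
      rw [PySem.Chars.join_cons_cons, List.append_assoc, List.singleton_append,
        cntSpec_append_sep sub hsub '\n' hsep, ih]
      simp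

def mkD (u t p c s v : Int) : PySem.Dict String Int :=
  ⟨[("units", u), ("temporal", t), ("phase", p), ("completion", c), ("saturn", s), ("valve", v)]⟩

-- per-category sums over the lines (proof-only helpers)
def catSum (lines : List (String × String)) (f : List Char → Int) : Int :=
  (lines.map (fun p => f (PySem.Chars.lower p.2.toList))).sum

def cT (e : List Char) : Int := (PySem.Chars.count e "ot".toList : Int)
def cP (e : List Char) : Int := (PySem.Chars.count e "ok".toList : Int)
def cC (e : List Char) : Int := (PySem.Chars.count e "aiin".toList : Int)
    + (PySem.Chars.count e "aiir".toList : Int) + (PySem.Chars.count e "daii".toList : Int)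
def cS (e : List Char) : Int := (PySem.Chars.count e "qokal".toList : Int)
def cV (e : List Char) : Int := (PySem.Chars.count e "ckh".toList : Int)
    + (PySem.Chars.count e "kch".toList : Int)

theorem catSum_cC (lines : List (String × String)) :
    catSum lines cC = catSum lines (fun e => (PySem.Chars.count e "aiin".toList : Int))
      + catSum lines (fun e => (PySem.Chars.count e "aiir".toList : Int))
      + catSum lines (fun e => (PySem.Chars.count e "daii".toList : Int)) := by
  unfold catSum cC
  induction lines with
  | nil => simp
  | cons x rest ih => simp only [List.map_cons, List.sum_cons, ih]; ring

theorem catSum_cV (lines : List (String × String)) :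
    catSum lines cV = catSum lines (fun e => (PySem.Chars.count e "ckh".toList : Int))
      + catSum lines (fun e => (PySem.Chars.count e "kch".toList : Int)) := by
  unfold catSum cV
  induction lines with
  | nil => simp
  | cons x rest ih => simp only [List.map_cons, List.sum_cons, ih]; ring

theorem big_count (lines : List (String × String)) (pat : String) (hne : pat.toList ≠ [])
    (hn : '\n' ∉ pat.toList) :
    ((PySem.Str.count (PySem.Str.join "\n" (lines.map (fun p => PySem.Str.lower p.2))) pat : Int))
      = catSum lines (fun e => (PySem.Chars.count e pat.toList : Int)) := by
  rw [PySem.Str.count_eq, PySem.Str.toList_join]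
  have hmap : (List.map String.toList (lines.map (fun p => PySem.Str.lower p.2)))
      = lines.map (fun p => PySem.Chars.lower p.2.toList) := by
    simp [List.map_map, Function.comp, PySem.Str.toList_lower]
  rw [hmap]
  have hsepl : ("\n" : String).toList = ['\n'] := rfl
  rw [hsepl, count_eq_cntSpec _ _ hne, cntSpec_join _ hne hn]
  unfold catSum
  rw [List.map_map, Nat.cast_list_sum, List.map_map]
  refine congrArg List.sum (List.map_congr_left ?_)
  intro p _
  simp [Function.comp, count_eq_cntSpec _ _ hne]

theorem astroStep_mkD (u t p c s v : Int) (x : String × String) :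
    astroStep (mkD u t p c s v) x =
      mkD (u + 1) (t + cT (PySem.Chars.lower x.2.toList)) (p + cP (PySem.Chars.lower x.2.toList))
        (c + cC (PySem.Chars.lower x.2.toList)) (s + cS (PySem.Chars.lower x.2.toList))
        (v + cV (PySem.Chars.lower x.2.toList)) := by
  simp only [astroStep, mkD, cT, cP, cC, cS, cV, PySem.Str.count_eq, PySem.Str.toList_lower]
  rfl

theorem foldl_astroStep (lines : List (String × String)) :
    ∀ (u t p c s v : Int),
      lines.foldl astroStep (mkD u t p c s v) =
        mkD (u + lines.length) (t + catSum lines cT) (p + catSum lines cP)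
          (c + catSum lines cC) (s + catSum lines cS) (v + catSum lines cV) := by
  induction lines with
  | nil => intro u t p c s v; simp [catSum]
  | cons x rest ih =>
    intro u t p c s v
    rw [List.foldl_cons, astroStep_mkD, ih]
    simp only [mkD, catSum, List.map_cons, List.sum_cons, List.length_cons, PySem.Dict.mk.injEq,
      List.cons.injEq, Prod.mk.injEq, true_and, and_true]
    push_cast
    omega

-- ===== VERDICT (by name: the statement is the Claim_ definition above) =====
theorem astro_counts_spec : Claim_equal_astro_counts := by
  intro lines _
  unfold Spec_astro_counts
  have hA : astro_counts lines =
      [("units", (lines.length : Int)), ("temporal", catSum lines cT), ("phase", catSum lines cP),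
       ("completion", catSum lines cC), ("saturn", catSum lines cS), ("valve", catSum lines cV)] := by
    unfold astro_counts
    have hinit : astroInit = mkD 0 0 0 0 0 0 := rfl
    rw [hinit, foldl_astroStep]
    simp [mkD]
  rw [hA]
  simp only [astro_counts_alt]
  rw [big_count lines "ot" (by decide) (by decide),
    big_count lines "ok" (by decide) (by decide),
    big_count lines "aiin" (by decide) (by decide),
    big_count lines "aiir" (by decide) (by decide),
    big_count lines "daii" (by decide) (by decide),
    big_count lines "qokal" (by decide) (by decide),
    big_count lines "ckh" (by decide) (by decide),
    big_count lines "kch" (by decide) (by decide)]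
  rw [catSum_cC, catSum_cV]
  rfl
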